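-- pv_equiv track=rewrite | github.com/shijohimself/Python-with-DSA | Assignments/Week-5/assignment - 1/q11.py | checkAlphaNumeric
-- ===== SOURCE A (Python) =====
-- def checkAlphaNumeric(string):
--     alphabets = False
--     digits = False
--     special_char = False
--     for ch in string:
--         asc = ord(ch)
--         if (asc >=60 and asc <= 90) or (asc >=97 and asc <= 122):
--             alphabets = True
--         elif asc >= 48 and asc <= 57:
--             digits = True
--         else:
--             special_char = True
--     if alphabets == True and digits == True and special_char == True:
--         return True
-- ===== SOURCE B (Python) =====
-- def checkAlphaNumeric(string):
--     alphabets = any((60 <= ord(ch) <= 90) or (97 <= ord(ch) <= 122) for ch in string)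
--     digits = any(48 <= ord(ch) <= 57 for ch in string)
--     special_char = any(not ((60 <= ord(ch) <= 90) or (97 <= ord(ch) <= 122)
--                             or (48 <= ord(ch) <= 57)) for ch in string)
--     if alphabets and digits and special_char:
--         return True
-- ===== Notes on version B (the rewrite author's own statement) =====
-- stated objective: idiomatic
-- what changed: Replaced the single fused flag-setting loop with three independent any() scans, one per character class (keeping A's odd 60-90 'alphabet' range), and kept the implicit None return.
import Mathlib
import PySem

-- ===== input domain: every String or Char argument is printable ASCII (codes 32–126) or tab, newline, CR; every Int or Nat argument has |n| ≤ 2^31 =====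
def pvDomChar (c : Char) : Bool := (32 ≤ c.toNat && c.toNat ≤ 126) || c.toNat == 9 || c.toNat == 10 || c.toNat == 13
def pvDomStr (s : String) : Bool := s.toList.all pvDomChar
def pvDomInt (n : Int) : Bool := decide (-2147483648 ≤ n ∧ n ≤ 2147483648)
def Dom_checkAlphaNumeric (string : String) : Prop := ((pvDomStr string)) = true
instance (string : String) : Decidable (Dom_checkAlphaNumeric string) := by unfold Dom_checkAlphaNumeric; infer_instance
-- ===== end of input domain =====

-- B replaces A's single fused flag-setting loop with three independent any-scans (one per character class); same O(n) cost, plainer decomposition.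


-- ===== PORT A =====
-- one fused loop over the characters, updating three flags with if/elif/else
def checkAlphaNumeric (string : String) : Option Bool :=
  let st := string.toList.foldl (fun (st : Bool × Bool × Bool) ch =>
    let asc := ch.toNat
    if (asc ≥ 60 ∧ asc ≤ 90) ∨ (asc ≥ 97 ∧ asc ≤ 122) then (true, st.2.1, st.2.2)
    else if asc ≥ 48 ∧ asc ≤ 57 then (st.1, true, st.2.2)
    else (st.1, st.2.1, true)) (false, false, false)
  if st.1 = true ∧ st.2.1 = true ∧ st.2.2 = true then some true else none

-- ===== PORT B =====
def pvAlphaB (ch : Char) : Bool := (60 ≤ ch.toNat && ch.toNat ≤ 90) || (97 ≤ ch.toNat && ch.toNat ≤ 122)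
def pvDigitB (ch : Char) : Bool := 48 ≤ ch.toNat && ch.toNat ≤ 57

def checkAlphaNumeric_alt (string : String) : Option Bool :=
  let alphabets := string.toList.any pvAlphaB
  let digits := string.toList.any pvDigitB
  let special := string.toList.any (fun ch => !(pvAlphaB ch || pvDigitB ch))
  if alphabets && digits && special then some true else none

-- ===== PRECONDITION & SPEC =====
def Spec_checkAlphaNumeric (string : String) (out : Option Bool) : Prop := out = checkAlphaNumeric_alt string
instance (string : String) (out : Option Bool) : Decidable (Spec_checkAlphaNumeric string out) := by unfold Spec_checkAlphaNumeric; infer_instance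

-- ===== CLAIM =====
def Claim_equal_checkAlphaNumeric : Prop := ∀ (string : String), Dom_checkAlphaNumeric string → Spec_checkAlphaNumeric string (checkAlphaNumeric string)

-- ===== LEMMAS AND PROOFS =====
lemma pvFoldFlags (l : List Char) (a d s : Bool) :
    l.foldl (fun (st : Bool × Bool × Bool) ch =>
      let asc := ch.toNat
      if (asc ≥ 60 ∧ asc ≤ 90) ∨ (asc ≥ 97 ∧ asc ≤ 122) then (true, st.2.1, st.2.2)
      else if asc ≥ 48 ∧ asc ≤ 57 then (st.1, true, st.2.2)
      else (st.1, st.2.1, true)) (a, d, s)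
    = (a || l.any pvAlphaB, d || l.any pvDigitB, s || l.any (fun ch => !(pvAlphaB ch || pvDigitB ch))) := by
  induction l generalizing a d s with
  | nil => simp
  | cons ch t ih =>
    simp only [List.foldl_cons, List.any_cons]
    by_cases h1 : (ch.toNat ≥ 60 ∧ ch.toNat ≤ 90) ∨ (ch.toNat ≥ 97 ∧ ch.toNat ≤ 122)
    · have ha : pvAlphaB ch = true := by simp [pvAlphaB]; omega
      have hd : pvDigitB ch = false := by simp [pvDigitB]; omega
      simp [h1, ih, ha, hd]
    · by_cases h2 : ch.toNat ≥ 48 ∧ ch.toNat ≤ 57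
      · have ha : pvAlphaB ch = false := by simp [pvAlphaB]; omega
        have hd : pvDigitB ch = true := by simp [pvDigitB]; omega
        simp [h1, h2, ih, ha, hd]
      · have ha : pvAlphaB ch = false := by simp [pvAlphaB]; omega
        have hd : pvDigitB ch = false := by simp [pvDigitB]; omega
        simp [h1, h2, ih, ha, hd]

-- ===== VERDICT =====
theorem checkAlphaNumeric_spec : Claim_equal_checkAlphaNumeric := by
  intro string _
  unfold Spec_checkAlphaNumeric checkAlphaNumeric checkAlphaNumeric_alt
  simp only [pvFoldFlags]
  simp [and_assoc]
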